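-- pv_equiv track=rewrite | github.com/ArunRoy404/Needleman-Wunsch-Algorithm-for-Genome-Sequence-Alignment | annotationAndAmino.py | annotate_mutations
-- ===== SOURCE A (Python) =====
-- def annotate_mutations(aligned_seq1, aligned_seq2):
--     mutations = []
--     positions = []
--     deletion_done = 0
--     similarity = 0
--     for i, (base1, base2) in enumerate(zip(aligned_seq1, aligned_seq2), start=1):
--         if base1 != base2:
--             if base1 == '-':
--                 mutations.append(f'Insertion    at position {i}: {base2}')
--                 positions.append(i-deletion_done)
--             elif base2 == '-':
--                 mutations.append(f'Deletion     at position {i}: {base1}')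
--                 deletion_done+=1
--             else:
--                 mutations.append(f'Substitution at position {i}: {base1} -> {base2}')
--                 positions.append(i-deletion_done)
--         else:
--             similarity += 1
--     return mutations, positions, similarity
-- ===== SOURCE B (Python) =====
-- def annotate_mutations(aligned_seq1, aligned_seq2):
--     pairs = list(zip(aligned_seq1, aligned_seq2))
--     similarity = sum(1 for a, b in pairs if a == b)
--     # first pass: number of deletion sites strictly before each position
--     before = []
--     d = 0
--     for a, b in pairs:
--         before.append(d)
--         if b == '-' and a != '-':
--             d += 1
--     # second pass: classify and format, consuming the prefix counts
--     mutations = []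
--     positions = []
--     for i, ((a, b), k) in enumerate(zip(pairs, before), start=1):
--         if a == '-' and b != '-':
--             mutations.append(f'Insertion    at position {i}: {b}')
--             positions.append(i - k)
--         elif b == '-' and a != '-':
--             mutations.append(f'Deletion     at position {i}: {a}')
--         elif a != b:
--             mutations.append(f'Substitution at position {i}: {a} -> {b}')
--             positions.append(i - k)
--     return mutations, positions, similarity
-- ===== Notes on version B (the rewrite author's own statement) =====
-- stated objective: alternative
-- what changed: Replaces A's single loop with a threaded deletion_done accumulator by three passes: a fold counting matches, a materialized prefix list of deletion counts strictly before each position, and a classification pass over the pairs zipped with that prefix list (with reordered, non-overlapping branch conditions).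
import Mathlib
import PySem

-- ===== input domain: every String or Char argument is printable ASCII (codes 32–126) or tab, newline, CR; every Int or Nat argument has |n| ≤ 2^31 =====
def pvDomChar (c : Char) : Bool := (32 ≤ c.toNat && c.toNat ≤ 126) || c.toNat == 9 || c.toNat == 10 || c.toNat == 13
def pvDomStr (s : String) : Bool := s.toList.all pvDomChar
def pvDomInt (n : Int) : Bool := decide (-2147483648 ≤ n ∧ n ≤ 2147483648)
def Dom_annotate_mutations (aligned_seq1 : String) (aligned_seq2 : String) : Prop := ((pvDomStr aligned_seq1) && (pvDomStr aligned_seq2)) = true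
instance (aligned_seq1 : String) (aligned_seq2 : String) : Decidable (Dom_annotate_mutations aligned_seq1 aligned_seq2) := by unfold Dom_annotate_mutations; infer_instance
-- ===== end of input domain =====

-- B replaces A's threaded deletion_done accumulator by a separate counting pass, a
-- materialized prefix list of deletion counts, and a second zipped classification pass
-- (objective: alternative decomposition, same cost).

-- ===== PORT A =====
-- A's loop body: state = (mutations, positions, deletion_done, similarity)
def pvA_step (st : List String × List Int × Int × Int) (p : Int × (Char × Char)) :
    List String × List Int × Int × Int :=
  let i := p.1; let b1 := p.2.1; let b2 := p.2.2
  if b1 ≠ b2 then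
    if b1 = '-' then
      (st.1 ++ ["Insertion    at position " ++ PySem.Int.toStr i ++ ": " ++ String.mk [b2]],
       st.2.1 ++ [i - st.2.2.1], st.2.2.1, st.2.2.2)
    else if b2 = '-' then
      (st.1 ++ ["Deletion     at position " ++ PySem.Int.toStr i ++ ": " ++ String.mk [b1]],
       st.2.1, st.2.2.1 + 1, st.2.2.2)
    else
      (st.1 ++ ["Substitution at position " ++ PySem.Int.toStr i ++ ": " ++ String.mk [b1]
                  ++ " -> " ++ String.mk [b2]],
       st.2.1 ++ [i - st.2.2.1], st.2.2.1, st.2.2.2)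
  else
    (st.1, st.2.1, st.2.2.1, st.2.2.2 + 1)

def annotate_mutations (aligned_seq1 : String) (aligned_seq2 : String) : List String × List Int × Int :=
  let st := (PySem.List.enumerate (aligned_seq1.toList.zip aligned_seq2.toList) 1).foldl
              pvA_step ([], [], 0, 0)
  (st.1, st.2.1, st.2.2.2)

-- ===== PORT B =====
-- first pass of Source B: number of deletion sites strictly before each position
def pvB_before : List (Char × Char) → Int → List Int
  | [], _ => []
  | (a, b) :: t, d => d :: pvB_before t (if b = '-' ∧ a ≠ '-' then d + 1 else d)

-- second pass of Source B: state = (mutations, positions)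
def pvB_step (st : List String × List Int) (p : Int × ((Char × Char) × Int)) :
    List String × List Int :=
  let i := p.1; let a := p.2.1.1; let b := p.2.1.2; let k := p.2.2
  if a = '-' ∧ b ≠ '-' then
    (st.1 ++ ["Insertion    at position " ++ PySem.Int.toStr i ++ ": " ++ String.mk [b]],
     st.2 ++ [i - k])
  else if b = '-' ∧ a ≠ '-' then
    (st.1 ++ ["Deletion     at position " ++ PySem.Int.toStr i ++ ": " ++ String.mk [a]], st.2)
  else if a ≠ b then
    (st.1 ++ ["Substitution at position " ++ PySem.Int.toStr i ++ ": " ++ String.mk [a]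
                ++ " -> " ++ String.mk [b]],
     st.2 ++ [i - k])
  else st

def annotate_mutations_alt (aligned_seq1 : String) (aligned_seq2 : String) : List String × List Int × Int :=
  let pairs := aligned_seq1.toList.zip aligned_seq2.toList
  let similarity := pairs.foldl (fun s p => if p.1 = p.2 then s + 1 else s) (0 : Int)
  let before := pvB_before pairs 0
  let r := (PySem.List.enumerate (pairs.zip before) 1).foldl pvB_step ([], [])
  (r.1, r.2, similarity)

-- ===== PRECONDITION & SPEC =====
def Spec_annotate_mutations (aligned_seq1 : String) (aligned_seq2 : String) (out : List String × List Int × Int) : Prop := out = annotate_mutations_alt aligned_seq1 aligned_seq2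
instance (aligned_seq1 : String) (aligned_seq2 : String) (out : List String × List Int × Int) : Decidable (Spec_annotate_mutations aligned_seq1 aligned_seq2 out) := by unfold Spec_annotate_mutations; infer_instance

-- ===== CLAIM (what is proved, stated in full; the proofs are below) =====
def Claim_equal_annotate_mutations : Prop := ∀ (aligned_seq1 : String) (aligned_seq2 : String), Dom_annotate_mutations aligned_seq1 aligned_seq2 → Spec_annotate_mutations aligned_seq1 aligned_seq2 (annotate_mutations aligned_seq1 aligned_seq2)

-- ===== LEMMAS AND PROOFS =====

def pvCntDel : List (Char × Char) → Int
  | [] => 0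
  | (a, b) :: t => (if b = '-' ∧ a ≠ '-' then 1 else 0) + pvCntDel t

def pvCntEq : List (Char × Char) → Int
  | [] => 0
  | (a, b) :: t => (if a = b then 1 else 0) + pvCntEq t

lemma pvSim_fold (l : List (Char × Char)) : ∀ s : Int,
    l.foldl (fun s p => if p.1 = p.2 then s + 1 else s) s = s + pvCntEq l := by
  induction l with
  | nil => intro s; simp [pvCntEq]
  | cons p t ih =>
    intro s
    obtain ⟨a, b⟩ := p
    by_cases h : a = b <;> simp [List.foldl, pvCntEq, h, ih, add_comm, add_assoc, add_left_comm]

lemma pvKey (l : List (Char × Char)) : ∀ (i d : Int) (ms : List String) (ps : List Int) (sim : Int),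
    (PySem.List.enumerate l i).foldl pvA_step (ms, ps, d, sim)
    = (((PySem.List.enumerate (l.zip (pvB_before l d)) i).foldl pvB_step (ms, ps)).1,
       ((PySem.List.enumerate (l.zip (pvB_before l d)) i).foldl pvB_step (ms, ps)).2,
       d + pvCntDel l, sim + pvCntEq l) := by
  induction l with
  | nil => intro i d ms ps sim; simp [PySem.List.enumerate_nil, pvCntDel, pvCntEq]
  | cons p t ih =>
    intro i d ms ps sim
    obtain ⟨a, b⟩ := p
    by_cases hab : a = b
    · subst hab
      simp [PySem.List.enumerate_cons, List.zip_cons_cons, pvB_before, pvA_step, pvB_step,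
            pvCntDel, pvCntEq, ih, add_comm, add_assoc, add_left_comm]
    · by_cases ha : a = '-'
      · have hb : b ≠ '-' := fun h => hab (h ▸ ha)
        subst ha
        simp [PySem.List.enumerate_cons, List.zip_cons_cons, pvB_before, pvA_step, pvB_step,
              pvCntDel, pvCntEq, hab, hb, ih, add_comm, add_assoc, add_left_comm]
      · by_cases hbd : b = '-'
        · subst hbd
          simp [PySem.List.enumerate_cons, List.zip_cons_cons, pvB_before, pvA_step, pvB_step,
                pvCntDel, pvCntEq, hab, ha, ih, add_comm, add_assoc, add_left_comm]
        · simp [PySem.List.enumerate_cons, List.zip_cons_cons, pvB_before, pvA_step, pvB_step,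
                pvCntDel, pvCntEq, hab, ha, hbd, ih, add_comm, add_assoc, add_left_comm]

-- ===== VERDICT (by name: the statement is the Claim_ definition above) =====
theorem annotate_mutations_spec : Claim_equal_annotate_mutations := by
  intro s1 s2 _
  unfold Spec_annotate_mutations annotate_mutations annotate_mutations_alt
  simp [pvKey, pvSim_fold]
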